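-- pv_equiv track=rewrite | github.com/FranciscoMassano/ISEL-MDP-2048 | j2048_motor_40708.py | ha_iguais_adjacentes
-- ===== SOURCE A (Python) =====
-- def ha_iguais_adjacentes(grelha):
--
--     ha = False
--
--     numero_linhas = len(grelha)
--     numero_colunas = len(grelha[0])
--
--      #testar por linhas
--     for l in range(numero_linhas):
--        for c in range(numero_colunas - 1):
--            if grelha[l][c] == grelha [l][c + 1]:
--                ha = True
--
--
--      #testar por colunas
--     for l in range(numero_linhas - 1):
--        for c in range(numero_colunas):
--            if grelha[l][c] == grelha [l + 1][c]:
--                ha = True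
--
--     return ha
-- ===== SOURCE B (Python) =====
-- def ha_iguais_adjacentes(grelha):
--     numero_colunas = len(grelha[0])
--     celulas = {(l, c, v)
--                for l, linha in enumerate(grelha)
--                for c, v in enumerate(linha[:numero_colunas])}
--     return any((l, c + 1, v) in celulas or (l + 1, c, v) in celulas
--                for (l, c, v) in celulas)
-- ===== Notes on version B (the rewrite author's own statement) =====
-- stated objective: alternative
-- what changed: A's two separate index-based double loops over the grid become a hash-set algorithm: B builds one set of (row, col, value) triples over the n x len(grelha[0]) grid and returns whether any triple's right or down neighbour triple is in the set, replacing direct neighbour indexing with set membership of shifted keys.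
import Mathlib
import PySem

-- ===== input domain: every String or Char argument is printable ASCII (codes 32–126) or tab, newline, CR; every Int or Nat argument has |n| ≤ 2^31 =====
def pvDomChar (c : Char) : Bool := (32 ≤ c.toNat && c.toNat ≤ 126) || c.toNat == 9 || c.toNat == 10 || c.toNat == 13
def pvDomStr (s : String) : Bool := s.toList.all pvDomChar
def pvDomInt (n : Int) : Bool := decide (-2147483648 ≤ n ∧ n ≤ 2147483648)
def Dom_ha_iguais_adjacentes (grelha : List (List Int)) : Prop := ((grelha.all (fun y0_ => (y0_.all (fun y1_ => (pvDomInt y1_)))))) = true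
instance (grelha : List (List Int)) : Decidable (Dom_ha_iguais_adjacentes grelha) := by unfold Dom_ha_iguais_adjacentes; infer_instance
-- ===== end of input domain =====

-- B replaces A's two index-based double loops by a set of (row, col, value) triples queried
-- at the shifted right/down keys (alternative algorithm; same O(n*m) cost).


-- ===== PORT A =====
-- grelha[l][c] : Python raises on an out-of-range index; PySem.List.pyGet? returns none
-- exactly there, and those inputs are excluded by Pre_ (len(grelha[0]) is total via getD
-- only because the empty grid, where Python raises, is outside Pre_).
def ha_iguais_adjacentes (grelha : List (List Int)) : Bool :=
  let numero_linhas : Int := grelha.length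
  let numero_colunas : Int := ((PySem.List.pyGet? grelha 0).getD []).length
  let ha : Bool := false
  -- testar por linhas
  let ha : Bool := (PySem.List.pyRange 0 numero_linhas 1).foldl (fun ha l =>
    (PySem.List.pyRange 0 (numero_colunas - 1) 1).foldl (fun ha c =>
      if ((PySem.List.pyGet? grelha l).bind (fun r => PySem.List.pyGet? r c)) ==
         ((PySem.List.pyGet? grelha l).bind (fun r => PySem.List.pyGet? r (c + 1)))
      then true else ha) ha) ha
  -- testar por colunas
  let ha : Bool := (PySem.List.pyRange 0 (numero_linhas - 1) 1).foldl (fun ha l =>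
    (PySem.List.pyRange 0 numero_colunas 1).foldl (fun ha c =>
      if ((PySem.List.pyGet? grelha l).bind (fun r => PySem.List.pyGet? r c)) ==
         ((PySem.List.pyGet? grelha (l + 1)).bind (fun r => PySem.List.pyGet? r c))
      then true else ha) ha) ha
  ha

-- ===== PORT B =====
-- numero_colunas = len(grelha[0]) (Python raises on [], excluded by Pre_; getD as in port A), then
-- the set comprehension {(l, c, v) for l, linha in enumerate(grelha) for c, v in enumerate(linha[:numero_colunas])}
def pvCells (grelha : List (List Int)) : List (Int × Int × Int) :=
  let numero_colunas : Int := ((PySem.List.pyGet? grelha 0).getD []).length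
  (PySem.List.enumerate grelha).flatMap (fun li =>
    (PySem.List.enumerate (PySem.List.slice li.2 none (some numero_colunas))).map (fun cv => (li.1, cv.1, cv.2)))

-- any((l, c+1, v) in celulas or (l+1, c, v) in celulas for (l, c, v) in celulas)
-- (any over a Python set: the result is order-independent, so the Set-as-list is exact)
def ha_iguais_adjacentes_alt (grelha : List (List Int)) : Bool :=
  let celulas : PySem.Set (Int × Int × Int) := PySem.Set.ofList (pvCells grelha)
  celulas.any (fun t =>
    PySem.Set.contains celulas (t.1, t.2.1 + 1, t.2.2) ||
    PySem.Set.contains celulas (t.1 + 1, t.2.1, t.2.2))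

-- ===== PRECONDITION & SPEC =====
-- Pre_ is exactly A's domain: outside it (the empty grid, or a row shorter than the first on
-- a grid with at least one column) A raises IndexError.
def Pre_ha_iguais_adjacentes (grelha : List (List Int)) : Prop :=
  grelha ≠ [] ∧ ∀ row ∈ grelha, grelha.headI.length ≤ row.length
instance (grelha : List (List Int)) : Decidable (Pre_ha_iguais_adjacentes grelha) := by
  unfold Pre_ha_iguais_adjacentes; infer_instance

def pvWitness_ha_iguais_adjacentes : List (List Int) := [[2, 2], [1, 3]]

def Spec_ha_iguais_adjacentes (grelha : List (List Int)) (out : Bool) : Prop := out = ha_iguais_adjacentes_alt grelha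
instance (grelha : List (List Int)) (out : Bool) : Decidable (Spec_ha_iguais_adjacentes grelha out) := by unfold Spec_ha_iguais_adjacentes; infer_instance

-- ===== CLAIM (what is proved, stated in full; the proofs are below) =====
def Claim_equal_ha_iguais_adjacentes : Prop := ∀ (grelha : List (List Int)), Dom_ha_iguais_adjacentes grelha → Pre_ha_iguais_adjacentes grelha → Spec_ha_iguais_adjacentes grelha (ha_iguais_adjacentes grelha)

-- ===== LEMMAS AND PROOFS =====

-- membership in B's triple list (the truncated row keeps exactly the first headI.length cells)
lemma mem_pvCells (g : List (List Int)) (h0 : PySem.List.pyGet? g 0 = some g.headI)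
    (t : Int × Int × Int) :
    t ∈ pvCells g ↔ ∃ (l c : Nat) (hl : l < g.length) (hc : c < g[l].length),
      c < g.headI.length ∧ t = ((l : Int), (c : Int), g[l][c]) := by
  unfold pvCells
  simp only [h0, Option.getD_some, List.mem_flatMap, List.mem_map,
    PySem.List.mem_enumerate_iff, PySem.List.slice_to_natCast]
  constructor
  · rintro ⟨li, ⟨l, hl, rfl⟩, cv, ⟨c, hc, rfl⟩, rfl⟩
    simp only [List.length_take, lt_min_iff] at hc
    exact ⟨l, c, hl, hc.2, hc.1, by simp [List.getElem_take]⟩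
  · rintro ⟨l, c, hl, hc, hcm, rfl⟩
    refine ⟨((l : Int), g[l]), ⟨l, hl, by simp⟩,
      ((c : Int), g[l][c]), ⟨c, by simp only [List.length_take, lt_min_iff]; exact ⟨hcm, hc⟩,
        by rw [← List.getElem_take' hc hcm]; simp⟩, rfl⟩

-- B as an existential over the triple list
lemma portB_iff (g : List (List Int)) :
    ha_iguais_adjacentes_alt g = true ↔
      ∃ t ∈ pvCells g, ((t.1, t.2.1 + 1, t.2.2) ∈ pvCells g ∨ (t.1 + 1, t.2.1, t.2.2) ∈ pvCells g) := by
  unfold ha_iguais_adjacentes_alt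
  simp only [List.any_eq_true, Bool.or_eq_true, PySem.Set.contains_iff, PySem.Set.mem_ofList]

-- any over range(0, m) as an existential over a Nat index
lemma range_any_iff (m : Int) (f : Int → Bool) :
    (PySem.List.pyRange 0 m 1).any f = true ↔ ∃ i : Nat, (i : Int) < m ∧ f (i : Int) = true := by
  simp only [List.any_eq_true, PySem.List.mem_pyRange_one]
  constructor
  · rintro ⟨x, ⟨hx0, hxm⟩, hfx⟩
    refine ⟨x.toNat, ?_, ?_⟩ <;> rw [Int.toNat_of_nonneg hx0] <;> assumption
  · rintro ⟨i, him, hfi⟩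
    exact ⟨(i : Int), ⟨by positivity, him⟩, hfi⟩

-- a sticky-flag fold is an `any` (specific shape of port A's loops)
lemma foldl_or_any {α : Type} (l : List α) (f : α → Bool) (b : Bool) :
    l.foldl (fun b x => b || f x) b = (b || l.any f) := by
  induction l generalizing b with
  | nil => simp
  | cons x t ih => simp [List.foldl_cons, ih, Bool.or_assoc]

-- the flag-folds of port A are `any`s
lemma portA_eq_any (grelha : List (List Int)) :
    ha_iguais_adjacentes grelha =
      ((PySem.List.pyRange 0 (grelha.length : Int) 1).any (fun l =>
        (PySem.List.pyRange 0 ((((PySem.List.pyGet? grelha 0).getD []).length : Int) - 1) 1).any (fun c =>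
          ((PySem.List.pyGet? grelha l).bind (fun r => PySem.List.pyGet? r c)) ==
          ((PySem.List.pyGet? grelha l).bind (fun r => PySem.List.pyGet? r (c + 1)))))
      || (PySem.List.pyRange 0 ((grelha.length : Int) - 1) 1).any (fun l =>
        (PySem.List.pyRange 0 (((PySem.List.pyGet? grelha 0).getD []).length : Int) 1).any (fun c =>
          ((PySem.List.pyGet? grelha l).bind (fun r => PySem.List.pyGet? r c)) ==
          ((PySem.List.pyGet? grelha (l + 1)).bind (fun r => PySem.List.pyGet? r c))))) := by
  unfold ha_iguais_adjacentes
  simp only [PySem.List.foldl_if_true_eq, foldl_or_any, Bool.false_or]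

-- ===== VERDICT (by name: the statement is the Claim_ definition above) =====
theorem ha_iguais_adjacentes_spec : Claim_equal_ha_iguais_adjacentes := by
  intro g _ hpre
  obtain ⟨hne, hrect⟩ := hpre
  unfold Spec_ha_iguais_adjacentes
  have h0 : PySem.List.pyGet? g 0 = some g.headI := by
    rcases g with _ | ⟨r, t⟩
    · exact absurd rfl hne
    · simp [PySem.List.pyGet?, PySem.List.pyIdx?]
  have hcol : (((PySem.List.pyGet? g 0).getD []).length : Int) = (g.headI.length : Int) := by
    rw [h0]; rfl
  have hlen : ∀ (l : Nat) (hl : l < g.length), g.headI.length ≤ g[l].length :=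
    fun l hl => hrect g[l] (List.getElem_mem hl)
  have cell : ∀ (l c : Nat) (hl : l < g.length) (hc : c < g[l].length),
      ((PySem.List.pyGet? g (l : Int)).bind (fun r => PySem.List.pyGet? r (c : Int))) =
        some g[l][c] := by
    intro l c hl hc
    rw [PySem.List.pyGet?_natCast, List.getElem?_eq_getElem hl]
    simp [PySem.List.pyGet?_natCast, List.getElem?_eq_getElem hc]
  rw [Bool.eq_iff_iff, portA_eq_any, portB_iff]
  simp only [Bool.or_eq_true, range_any_iff, hcol, mem_pvCells g h0]
  constructor
  · rintro (⟨l, hl, c, hc, hcond⟩ | ⟨l, hl, c, hc, hcond⟩)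
    -- horizontal hit of A
    · have hl' : l < g.length := by exact_mod_cast hl
      have hcm1 : c + 1 < g.headI.length := by omega
      have hc1 : c + 1 < g[l].length := by have := hlen l hl'; omega
      have hc0 : c < g[l].length := by omega
      rw [cell l c hl' hc0, show ((c : Int) + 1) = ((c + 1 : Nat) : Int) by push_cast; ring,
        cell l (c + 1) hl' hc1] at hcond
      refine ⟨((l : Int), (c : Int), g[l][c]), ⟨l, c, hl', hc0, by omega, rfl⟩, Or.inl ?_⟩
      refine ⟨l, c + 1, hl', hc1, hcm1, ?_⟩
      simp only [beq_iff_eq, Option.some.injEq] at hcond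
      simp [hcond]
    -- vertical hit of A
    · have hl' : l + 1 < g.length := by omega
      have hl0 : l < g.length := by omega
      have hcm : c < g.headI.length := by omega
      have hcL : c < g[l].length := by have := hlen l hl0; omega
      have hcL1 : c < g[l + 1].length := by have := hlen (l + 1) hl'; omega
      rw [cell l c hl0 hcL, show ((l : Int) + 1) = ((l + 1 : Nat) : Int) by push_cast; ring,
        cell (l + 1) c hl' hcL1] at hcond
      refine ⟨((l : Int), (c : Int), g[l][c]), ⟨l, c, hl0, hcL, hcm, rfl⟩, Or.inr ?_⟩
      refine ⟨l + 1, c, hl', hcL1, hcm, ?_⟩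
      simp only [beq_iff_eq, Option.some.injEq] at hcond
      simp [hcond]
  · rintro ⟨t, ⟨l, c, hl, hc, hcm, rfl⟩, (⟨l', c', hl', hc', hcm', heq⟩ | ⟨l', c', hl', hc', hcm', heq⟩)⟩
    -- right neighbour in the set
    · simp only [Prod.mk.injEq, Nat.cast_inj] at heq
      obtain ⟨hll, hcc, hv⟩ := heq
      subst hll
      have hc'c : c' = c + 1 := by omega
      subst hc'c
      refine Or.inl ⟨l, by exact_mod_cast hl, c, by omega, ?_⟩
      rw [cell l c hl hc, show ((c : Int) + 1) = ((c + 1 : Nat) : Int) by push_cast; ring,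
        cell l (c + 1) hl hc']
      simp [hv]
    -- down neighbour in the set
    · simp only [Prod.mk.injEq, Nat.cast_inj] at heq
      obtain ⟨hll, hcc, hv⟩ := heq
      subst hcc
      have hl'l : l' = l + 1 := by omega
      subst hl'l
      refine Or.inr ⟨l, by omega, c, by omega, ?_⟩
      rw [cell l c hl hc, show ((l : Int) + 1) = ((l + 1 : Nat) : Int) by push_cast; ring,
        cell (l + 1) c hl' hc']
      simp [hv]
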